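-- pv_equiv track=rewrite | github.com/Not8/FirstApproach | palindroma.py | resolve_palindrome
-- ===== SOURCE A (Python) =====
-- def resolve_palindrome(phrase):
--     phrase = phrase.replace(" ", "").lower()
--     for i in enumerate(phrase):
--         if i[1] != phrase[len(phrase)-i[0]-1]:
--             return False
--         if (i[0] == len(phrase)/2):
--             break
--     return True
-- ===== SOURCE B (Python) =====
-- def resolve_palindrome(phrase):
--     phrase = phrase.replace(" ", "").lower()
--     return phrase == phrase[::-1]
-- ===== Notes on version B (the rewrite author's own statement) =====
-- stated objective: idiomatic
-- what changed: Replaces the explicit two-pointer enumerate loop with midpoint break by a single reverse-and-compare (phrase == phrase[::-1]) after the same normalization.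
import Mathlib
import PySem

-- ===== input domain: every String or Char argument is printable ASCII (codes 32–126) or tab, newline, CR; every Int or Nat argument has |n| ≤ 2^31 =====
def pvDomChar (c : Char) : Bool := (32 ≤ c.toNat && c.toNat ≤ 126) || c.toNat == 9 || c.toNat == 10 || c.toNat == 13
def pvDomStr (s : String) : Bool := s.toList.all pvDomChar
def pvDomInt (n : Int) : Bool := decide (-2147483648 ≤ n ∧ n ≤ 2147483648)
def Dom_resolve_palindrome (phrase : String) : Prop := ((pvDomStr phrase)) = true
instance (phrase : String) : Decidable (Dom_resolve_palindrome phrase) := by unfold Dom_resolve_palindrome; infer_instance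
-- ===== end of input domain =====

-- B replaces A's two-pointer enumerate loop (with its midpoint break) by a single
-- reverse-and-compare after the identical normalization; same cost, more idiomatic.

-- ===== PORT A =====
-- the 'for i in enumerate(phrase): …' loop; i.1 is the index, i.2 the character.
-- 'i[0] == len(phrase)/2' is int-vs-float equality: it holds exactly when 2*i[0] = len(phrase).
def pvGoA (cs : List Char) : List (Int × Char) → Bool
  | [] => true
  | (i, c) :: rest =>
    match PySem.List.pyGet? cs ((cs.length : Int) - i - 1) with
    | none => false   -- IndexError; unreachable since the index is always in range
    | some d =>
      if c ≠ d then false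
      else if 2 * i = (cs.length : Int) then true
      else pvGoA cs rest

def resolve_palindrome (phrase : String) : Bool :=
  let cs := PySem.Chars.lower (PySem.Chars.replace phrase.toList [' '] [])
  pvGoA cs (PySem.List.enumerate cs 0)

-- ===== PORT B =====
-- phrase == phrase[::-1]; the step -1 slice is reverse (PySem.List.slice?_none_none_neg_one).
def resolve_palindrome_alt (phrase : String) : Bool :=
  let cs := PySem.Chars.lower (PySem.Chars.replace phrase.toList [' '] [])
  cs == cs.reverse

-- ===== PRECONDITION & SPEC =====
def Spec_resolve_palindrome (phrase : String) (out : Bool) : Prop := out = resolve_palindrome_alt phrase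
instance (phrase : String) (out : Bool) : Decidable (Spec_resolve_palindrome phrase out) := by unfold Spec_resolve_palindrome; infer_instance

-- ===== CLAIM (what is proved, stated in full; the proofs are below) =====
def Claim_equal_resolve_palindrome : Prop := ∀ (phrase : String), Dom_resolve_palindrome phrase → Spec_resolve_palindrome phrase (resolve_palindrome phrase)

-- ===== LEMMAS AND PROOFS =====

-- Number of loop iterations A performs when starting at index k on a string of length n:
-- up to (and including) n/2 if n is even and the break is still reachable, else to the end.
def pvStop (n k : Nat) : Nat := if n % 2 = 0 ∧ 2 * k ≤ n then min (n / 2 + 1) n else n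

lemma pvStop_succ (n k : Nat) (h : 2 * k ≠ n) : pvStop n (k + 1) = pvStop n k := by
  unfold pvStop
  split_ifs with h1 h2 <;> omega

lemma pvGoA_eq_decide (cs : List Char) :
    ∀ (t : List Char) (k : Nat), t = cs.drop k →
      pvGoA cs (PySem.List.enumerate t (k : Int)) =
        decide (∀ j : Nat, k ≤ j → j < pvStop cs.length k → cs[j]? = cs[cs.length - 1 - j]?) := by
  intro t
  induction t with
  | nil =>
    intro k hk
    have hkn : cs.length ≤ k := by
      by_contra h
      have := List.drop_eq_nil_iff.mp hk.symm
      omega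
    have hstop : pvStop cs.length k ≤ k ∨ cs.length = 0 := by
      unfold pvStop; split_ifs with h <;> omega
    simp [PySem.List.enumerate, pvGoA]
    intro j h1 h2
    rcases hstop with h | h
    · omega
    · simp [h]
  | cons c t' ih =>
    intro k hk
    have hklt : k < cs.length := by
      by_contra h
      rw [List.drop_eq_nil_iff.mpr (by omega)] at hk; cases hk
    have hck : cs[k]? = some c := by
      have h0 : (cs.drop k)[0]? = some c := by rw [← hk]; rfl
      rwa [List.getElem?_drop, Nat.add_zero] at h0
    have ht' : t' = cs.drop (k + 1) := by
      have : (cs.drop k).tail = cs.drop (k + 1) := by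
        rw [List.tail_drop]
      rw [← this, ← hk]; rfl
    have hidx : (cs.length : Int) - (k : Int) - 1 = ((cs.length - 1 - k : Nat) : Int) := by
      omega
    have hlt : cs.length - 1 - k < cs.length := by omega
    have hget : PySem.List.pyGet? cs ((cs.length : Int) - (k : Int) - 1)
        = some cs[cs.length - 1 - k] := by
      rw [hidx, PySem.List.pyGet?_natCast, List.getElem?_eq_getElem hlt]
    have hkstop : k < pvStop cs.length k := by
      unfold pvStop; split_ifs with h <;> omega
    rw [PySem.List.enumerate_cons]
    show pvGoA cs ((↑k, c) :: PySem.List.enumerate t' (↑k + 1)) = _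
    rw [pvGoA]
    rw [hget]
    show (if c ≠ cs[cs.length - 1 - k] then false
          else if 2 * (k : Int) = (cs.length : Int) then true
          else pvGoA cs (PySem.List.enumerate t' ((k : Int) + 1)))
        = decide (∀ j : Nat, k ≤ j → j < pvStop cs.length k → cs[j]? = cs[cs.length - 1 - j]?)
    by_cases hne : c ≠ cs[cs.length - 1 - k]
    · rw [if_pos hne]
      symm; apply decide_eq_false
      intro hall
      have := hall k (le_refl k) hkstop
      rw [hck, List.getElem?_eq_getElem hlt] at this
      exact hne (Option.some.injEq _ _ ▸ this)
    · rw [not_not] at hne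
      rw [if_neg (not_not_intro hne)]
      have hPk : cs[k]? = cs[cs.length - 1 - k]? := by
        rw [hck, List.getElem?_eq_getElem hlt, hne]
      by_cases hbr : 2 * (k : Int) = (cs.length : Int)
      · have hbrn : 2 * k = cs.length := by exact_mod_cast hbr
        rw [if_pos hbr]
        have hstopk : pvStop cs.length k = k + 1 := by
          unfold pvStop
          rw [if_pos ⟨by omega, by omega⟩]
          omega
        rw [hstopk]
        symm; apply decide_eq_true
        intro j h1 h2
        have : j = k := by omega
        subst this; exact hPk
      · have hbrn : 2 * k ≠ cs.length := by
          intro h; exact hbr (by exact_mod_cast h)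
        rw [if_neg hbr]
        have hcast : ((k : Int) + 1) = ((k + 1 : Nat) : Int) := by push_cast; ring
        rw [hcast, ih (k + 1) ht']
        rw [pvStop_succ cs.length k hbrn]
        by_cases hall : ∀ j : Nat, k + 1 ≤ j → j < pvStop cs.length k → cs[j]? = cs[cs.length - 1 - j]?
        · rw [decide_eq_true hall]
          symm; apply decide_eq_true
          intro j h1 h2
          rcases Nat.eq_or_lt_of_le h1 with h | h
          · subst h; exact hPk
          · exact hall j h h2
        · rw [decide_eq_false hall]
          symm; apply decide_eq_false
          intro hall'
          exact hall (fun j h1 h2 => hall' j (by omega) h2)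

lemma pvPalindrome_iff (cs : List Char) :
    (∀ j : Nat, 0 ≤ j → j < pvStop cs.length 0 → cs[j]? = cs[cs.length - 1 - j]?) ↔
      cs = cs.reverse := by
  constructor
  · intro h
    apply List.ext_getElem?
    intro j
    by_cases hj : j < cs.length
    · rw [List.getElem?_reverse hj]
      by_cases hjs : j < pvStop cs.length 0
      · exact h j (Nat.zero_le j) hjs
      · have hs : pvStop cs.length 0 =
            if cs.length % 2 = 0 then min (cs.length / 2 + 1) cs.length else cs.length := by
          unfold pvStop; simp
        rw [hs] at hjs
        by_cases he : cs.length % 2 = 0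
        · rw [if_pos he] at hjs
          have hj' : cs.length - 1 - j < pvStop cs.length 0 := by
            rw [hs, if_pos he]; omega
          have := h (cs.length - 1 - j) (Nat.zero_le _) hj'
          have harg : cs.length - 1 - (cs.length - 1 - j) = j := by omega
          rw [harg] at this
          exact this.symm
        · rw [if_neg he] at hjs
          exact absurd hj hjs
    · rw [List.getElem?_eq_none_iff.mpr (by omega),
        List.getElem?_eq_none_iff.mpr (by simp; omega)]
  · intro h j _ hjs
    have hjn : j < cs.length := by
      have : pvStop cs.length 0 ≤ cs.length := by unfold pvStop; split_ifs <;> omega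
      omega
    rw [← List.getElem?_reverse hjn, ← h]

-- ===== VERDICT (by name: the statement is the Claim_ definition above) =====
theorem resolve_palindrome_spec : Claim_equal_resolve_palindrome := by
  intro phrase _
  unfold Spec_resolve_palindrome resolve_palindrome resolve_palindrome_alt
  set cs := PySem.Chars.lower (PySem.Chars.replace phrase.toList [' '] []) with hcs
  show pvGoA cs (PySem.List.enumerate cs 0) = (cs == cs.reverse)
  have h0 : (0 : Int) = ((0 : Nat) : Int) := rfl
  have hd : cs = cs.drop 0 := rfl
  rw [h0, pvGoA_eq_decide cs cs 0 hd]
  rcases Bool.eq_false_or_eq_true (cs == cs.reverse) with h | h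
  · rw [h]
    apply decide_eq_true
    rw [beq_iff_eq] at h
    exact (pvPalindrome_iff cs).mpr h
  · rw [h]
    apply decide_eq_false
    intro hall
    have := (pvPalindrome_iff cs).mp hall
    rw [beq_eq_false_iff_ne] at h
    exact h this
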